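-- pv_equiv track=rewrite | github.com/pdsykes2512/surg-db | backend/app/utils/encryption.py | pseudonymize_for_logging
-- ===== SOURCE A (Python) =====
-- ENCRYPTED_FIELDS = {
--     # Direct identifiers
--     'nhs_number',           # National identifier
--     'mrn',                  # Medical record number (PAS number)
--     'hospital_number',      # Legacy hospital identifier
--
--     # Personal identifiers
--     'first_name',          # Given name
--     'last_name',           # Surname/family name
--
--     # Sensitive dates
--     'date_of_birth',       # DOB is quasi-identifier
--     'deceased_date',       # Date of death
--
--     # Geographic identifiers
--     'postcode'             # UK postcode (partial identifier)
-- }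
--
-- def pseudonymize_for_logging(document: dict) -> dict:
--     """
--     Remove sensitive fields from a document for safe logging
--
--     Args:
--         document: Document to pseudonymize
--
--     Returns:
--         Document with sensitive fields replaced with [REDACTED]
--
--     Example:
--         >>> doc = {'nhs_number': '1234567890', 'name': 'John Smith', 'patient_id': 'P001'}
--         >>> pseudonymize_for_logging(doc)
--         {'nhs_number': '[REDACTED]', 'name': '[REDACTED]', 'patient_id': 'P001'}
--     """
--     safe_doc = document.copy()
--
--     # Redact encrypted fields
--     for field in ENCRYPTED_FIELDS:
--         if field in safe_doc:
--             safe_doc[field] = '[REDACTED]'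
--
--     # Redact other PII
--     pii_fields = ['name', 'first_name', 'last_name', 'address', 'phone', 'email']
--     for field in pii_fields:
--         if field in safe_doc:
--             safe_doc[field] = '[REDACTED]'
--
--     return safe_doc
-- ===== SOURCE B (Python) =====
-- ENCRYPTED_FIELDS = {
--     'nhs_number',
--     'mrn',
--     'hospital_number',
--     'first_name',
--     'last_name',
--     'date_of_birth',
--     'deceased_date',
--     'postcode'
-- }
--
-- _REDACT = ENCRYPTED_FIELDS | {'name', 'first_name', 'last_name',
--                               'address', 'phone', 'email'}
--
--
-- def pseudonymize_for_logging(document: dict) -> dict: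
--     return {k: ('[REDACTED]' if k in _REDACT else v)
--             for k, v in document.items()}
-- ===== Notes on version B (the rewrite author's own statement) =====
-- stated objective: idiomatic
-- what changed: A copies the dict and runs two loops over fixed field lists, mutating entries found in the copy; B precomputes one combined redaction set and builds the result in a single dict comprehension traversing the document itself.
import Mathlib
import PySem

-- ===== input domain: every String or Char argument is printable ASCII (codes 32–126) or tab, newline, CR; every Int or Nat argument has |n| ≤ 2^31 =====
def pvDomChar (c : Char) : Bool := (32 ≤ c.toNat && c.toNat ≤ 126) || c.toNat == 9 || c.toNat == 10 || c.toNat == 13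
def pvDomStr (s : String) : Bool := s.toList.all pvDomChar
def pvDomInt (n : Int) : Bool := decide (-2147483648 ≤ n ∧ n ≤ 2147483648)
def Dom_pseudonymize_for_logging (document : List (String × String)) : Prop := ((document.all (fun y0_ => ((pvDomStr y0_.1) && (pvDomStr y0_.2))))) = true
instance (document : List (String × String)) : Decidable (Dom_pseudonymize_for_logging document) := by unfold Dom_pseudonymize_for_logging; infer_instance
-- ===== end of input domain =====

-- B replaces A's copy-then-two-mutating-loops-over-field-lists with one combined
-- redaction set and a single comprehension over the document (idiomatic; same cost).


-- ===== PORT A =====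
-- module constant ENCRYPTED_FIELDS (a Python set literal)
def pvEncryptedFields : PySem.Set String :=
  PySem.Set.ofList ["nhs_number", "mrn", "hospital_number", "first_name",
                    "last_name", "date_of_birth", "deceased_date", "postcode"]

-- 'if field in safe_doc: safe_doc[field] = "[REDACTED]"' (one loop body of A)
def pvRedactStep (d : PySem.Dict String String) (field : String) : PySem.Dict String String :=
  if d.contains field then d.insert field "[REDACTED]" else d

def pseudonymize_for_logging (document : List (String × String)) : List (String × String) :=
  let safe_doc := PySem.Dict.ofList document        -- document.copy()
  let safe_doc := pvEncryptedFields.foldl pvRedactStep safe_doc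
  let pii_fields := ["name", "first_name", "last_name", "address", "phone", "email"]
  let safe_doc := pii_fields.foldl pvRedactStep safe_doc
  safe_doc.items

-- ===== PORT B =====
-- _REDACT = ENCRYPTED_FIELDS | {'name','first_name','last_name','address','phone','email'}
def pvRedactSet : PySem.Set String :=
  PySem.Set.union pvEncryptedFields
    (PySem.Set.ofList ["name", "first_name", "last_name", "address", "phone", "email"])

def pseudonymize_for_logging_alt (document : List (String × String)) : List (String × String) :=
  document.map (fun kv => (kv.1, if pvRedactSet.contains kv.1 then "[REDACTED]" else kv.2))

-- ===== PRECONDITION & SPEC =====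
-- Pre_ excludes association lists with duplicate keys, which cannot arise from A's
-- Python dict argument (a dict has unique keys); it excludes no input A returns on.
def Pre_pseudonymize_for_logging (document : List (String × String)) : Prop :=
  (document.map Prod.fst).Nodup
instance (document : List (String × String)) : Decidable (Pre_pseudonymize_for_logging document) := by unfold Pre_pseudonymize_for_logging; infer_instance

def pvWitness_pseudonymize_for_logging : (List (String × String)) :=
  ([("nhs_number", "1234567890"), ("name", "John Smith"), ("patient_id", "P001")])

def Spec_pseudonymize_for_logging (document : List (String × String)) (out : List (String × String)) : Prop := out = pseudonymize_for_logging_alt document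
instance (document : List (String × String)) (out : List (String × String)) : Decidable (Spec_pseudonymize_for_logging document out) := by unfold Spec_pseudonymize_for_logging; infer_instance

-- ===== CLAIM (what is proved, stated in full; the proofs are below) =====
def Claim_equal_pseudonymize_for_logging : Prop := ∀ (document : List (String × String)), Dom_pseudonymize_for_logging document → Pre_pseudonymize_for_logging document → Spec_pseudonymize_for_logging document (pseudonymize_for_logging document)

-- ===== LEMMAS AND PROOFS =====

-- one redaction loop of A rewrites each entry whose key is in the field list
lemma foldl_redact_items (fields : List String) (d : PySem.Dict String String) :
    (fields.foldl pvRedactStep d).items =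
      d.items.map (fun kv => if kv.1 ∈ fields then (kv.1, "[REDACTED]") else kv) := by
  induction fields generalizing d with
  | nil => simp
  | cons f fs ih =>
    rw [List.foldl_cons, ih]
    cases h : d.contains f with
    | false =>
      have hstep : pvRedactStep d f = d := by unfold pvRedactStep; rw [h]; rfl
      rw [hstep]
      refine List.map_congr_left (fun kv hkv => ?_)
      have hne : kv.1 ≠ f := by
        intro hEq
        have : f ∈ d.keys := hEq ▸ PySem.Dict.mem_keys_of_mem_items d hkv
        have := (PySem.Dict.contains_iff_mem_keys d f).mpr this
        rw [h] at this; exact Bool.false_ne_true this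
      simp [List.mem_cons, hne]
    | true =>
      have hstep : pvRedactStep d f = d.insert f "[REDACTED]" := by
        unfold pvRedactStep; rw [h]; rfl
      rw [hstep, PySem.Dict.items_insert_of_contains d _ h, List.map_map]
      refine List.map_congr_left (fun kv _ => ?_)
      by_cases hk : kv.1 = f
      · subst hk; simp [List.mem_cons]
      · simp [List.mem_cons, hk, beq_iff_eq]

-- document.copy() of a duplicate-free association list keeps the list as is
lemma ofList_items (document : List (String × String))
    (h : (document.map Prod.fst).Nodup) :
    (PySem.Dict.ofList document).items = document := by
  have := PySem.Dict.items_foldl_insert_fresh document Prod.fst Prod.snd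
    (PySem.Dict.empty (κ := String) (ν := String))
    (fun a _ => PySem.Dict.contains_empty a.1) h
  simpa [PySem.Dict.ofList, PySem.Dict.update] using this

-- membership in B's combined set = membership in either of A's field lists
lemma mem_redactSet (k : String) :
    k ∈ pvRedactSet ↔
      k ∈ ["nhs_number", "mrn", "hospital_number", "first_name", "last_name",
           "date_of_birth", "deceased_date", "postcode"] ∨
      k ∈ ["name", "first_name", "last_name", "address", "phone", "email"] := by
  unfold pvRedactSet pvEncryptedFields
  rw [PySem.Set.mem_union, PySem.Set.mem_ofList, PySem.Set.mem_ofList]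

-- ===== VERDICT (by name: the statement is the Claim_ definition above) =====
theorem pseudonymize_for_logging_spec : Claim_equal_pseudonymize_for_logging := by
  intro document _ hpre
  unfold Spec_pseudonymize_for_logging pseudonymize_for_logging pseudonymize_for_logging_alt
  have henc : (pvEncryptedFields : List String) =
      ["nhs_number", "mrn", "hospital_number", "first_name", "last_name",
       "date_of_birth", "deceased_date", "postcode"] := by decide
  rw [henc, foldl_redact_items, foldl_redact_items, ofList_items document hpre, List.map_map]
  refine List.map_congr_left (fun kv _ => ?_)
  by_cases h1 : kv.1 ∈ ["nhs_number", "mrn", "hospital_number", "first_name",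
      "last_name", "date_of_birth", "deceased_date", "postcode"] <;>
    by_cases h2 : kv.1 ∈ ["name", "first_name", "last_name", "address", "phone", "email"] <;>
    simp [Function.comp, h1, h2, (mem_redactSet kv.1)]
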